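-- pv_equiv track=rewrite | github.com/Brandon-Baker11/IPv4-Subnetting-Question-Generator | question_gen.py | get_subnet_id
-- ===== SOURCE A (Python) =====
-- def get_subnet_id(subnet_mask, ip, address_size, int_octet):
--     "Calculates the subnet ID address for the IP configuration that is generated."
--     _id = []
--     index = 0
--
--     for octet in subnet_mask:
--         if octet == 255:
--             _id.append(ip[index])
--             index += 1
--
--     boundary_start = 0
--     boundary_end = address_size - 1
--
--     while ip[int_octet] > boundary_start and ip[int_octet] > boundary_end:
--         boundary_start += address_size
--         boundary_end += address_size
--
--     _id.append(boundary_start)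
--
--     while len(_id) < 4:
--         _id.append(0)
--
--     return _id
-- ===== SOURCE B (Python) =====
-- def get_subnet_id(subnet_mask, ip, address_size, int_octet):
--     "Calculates the subnet ID address for the IP configuration that is generated."
--     octet = ip[int_octet]
--     boundary = (octet // address_size) * address_size if octet > 0 else 0
--     _id = ip[:subnet_mask.count(255)] + [boundary]
--     return _id + [0] * (4 - len(_id))
-- ===== Notes on version B (the rewrite author's own statement) =====
-- stated objective: simpler
-- what changed: Replaces the index-tracking for loop with a slice ip[:subnet_mask.count(255)], the boundary-search while loop with a closed-form floor-division (octet//address_size)*address_size guarded by octet>0, and the padding while loop with list arithmetic.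
import Mathlib
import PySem

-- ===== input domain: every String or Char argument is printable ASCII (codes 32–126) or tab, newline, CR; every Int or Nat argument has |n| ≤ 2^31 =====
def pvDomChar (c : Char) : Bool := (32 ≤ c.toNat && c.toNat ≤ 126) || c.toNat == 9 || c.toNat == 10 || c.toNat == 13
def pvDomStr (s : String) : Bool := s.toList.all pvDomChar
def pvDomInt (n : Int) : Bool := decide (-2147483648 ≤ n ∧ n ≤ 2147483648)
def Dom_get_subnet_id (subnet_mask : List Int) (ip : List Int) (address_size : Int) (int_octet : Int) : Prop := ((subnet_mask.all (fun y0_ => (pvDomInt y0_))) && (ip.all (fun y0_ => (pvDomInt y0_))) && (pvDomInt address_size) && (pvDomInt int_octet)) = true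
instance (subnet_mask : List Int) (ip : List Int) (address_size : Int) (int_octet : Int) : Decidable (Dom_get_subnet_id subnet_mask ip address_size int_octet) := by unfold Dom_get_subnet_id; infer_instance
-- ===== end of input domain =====

-- B replaces A's three loops by a slice, a closed-form floor-division and list arithmetic; equal on Pre_.

-- ===== PORT A =====
-- the for loop: state (_id, index)
def pvStepA (ip : List Int) (st : List Int × Int) (octet : Int) : List Int × Int :=
  if octet = 255 then (st.1 ++ [(PySem.List.pyGet? ip st.2).getD 0], st.2 + 1) else st

-- the boundary while loop, with fuel (enough fuel inside Pre_; A diverges where fuel could run out)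
def pvWhileA (v a : Int) : Nat → Int → Int → Int
  | 0, bs, _ => bs
  | n + 1, bs, be => if v > bs ∧ v > be then pvWhileA v a n (bs + a) (be + a) else bs

-- the padding while loop (runs at most 4 times since _id is nonempty)
def pvPadA : Nat → List Int → List Int
  | 0, l => l
  | n + 1, l => if l.length < 4 then pvPadA n (l ++ [0]) else l

def get_subnet_id (subnet_mask : List Int) (ip : List Int) (address_size : Int) (int_octet : Int) : List Int :=
  let st := subnet_mask.foldl (pvStepA ip) ([], 0)
  let v := (PySem.List.pyGet? ip int_octet).getD 0
  let bs := pvWhileA v address_size (v.toNat + 1) 0 (address_size - 1)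
  pvPadA 4 (st.1 ++ [bs])

-- ===== PORT B =====
def get_subnet_id_alt (subnet_mask : List Int) (ip : List Int) (address_size : Int) (int_octet : Int) : List Int :=
  let octet := (PySem.List.pyGet? ip int_octet).getD 0
  let boundary := if octet > 0 then PySem.Int.floordiv octet address_size * address_size else 0
  let _id := PySem.List.slice ip none (some (subnet_mask.count 255 : Int)) ++ [boundary]
  _id ++ List.replicate (4 - _id.length) 0

-- ===== PRECONDITION & SPEC =====
-- Pre_ excludes exactly the inputs where Python A does not return: ip[int_octet] raises IndexError,
-- the for loop indexes ip past its end (more 255 octets than ip entries), or the boundary while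
-- loop diverges (address_size ≤ 0 with a positive indexed octet).
def Pre_get_subnet_id (subnet_mask : List Int) (ip : List Int) (address_size : Int) (int_octet : Int) : Prop :=
  subnet_mask.count 255 ≤ ip.length ∧
  PySem.Raise.InRange ip.length int_octet ∧
  (1 ≤ address_size ∨ (PySem.List.pyGet? ip int_octet).getD 0 ≤ 0)
instance (subnet_mask : List Int) (ip : List Int) (address_size : Int) (int_octet : Int) : Decidable (Pre_get_subnet_id subnet_mask ip address_size int_octet) := by unfold Pre_get_subnet_id; infer_instance

def pvWitness_get_subnet_id : List Int × List Int × Int × Int := ([255, 255, 0, 0], [192, 168, 77, 3], 64, 2)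

def Spec_get_subnet_id (subnet_mask : List Int) (ip : List Int) (address_size : Int) (int_octet : Int) (out : List Int) : Prop := out = get_subnet_id_alt subnet_mask ip address_size int_octet
instance (subnet_mask : List Int) (ip : List Int) (address_size : Int) (int_octet : Int) (out : List Int) : Decidable (Spec_get_subnet_id subnet_mask ip address_size int_octet out) := by unfold Spec_get_subnet_id; infer_instance

-- ===== CLAIM (what is proved, stated in full; the proofs are below) =====
def Claim_equal_get_subnet_id : Prop := ∀ (subnet_mask : List Int) (ip : List Int) (address_size : Int) (int_octet : Int), Dom_get_subnet_id subnet_mask ip address_size int_octet → Pre_get_subnet_id subnet_mask ip address_size int_octet → Spec_get_subnet_id subnet_mask ip address_size int_octet (get_subnet_id subnet_mask ip address_size int_octet)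

-- ===== LEMMAS AND PROOFS =====

-- the for loop builds acc ++ the next (count 255) entries of ip
theorem pvFoldA_eq (ip : List Int) (sm : List Int) : ∀ (acc : List Int) (i : Nat),
    sm.count 255 ≤ (ip.drop i).length →
    (sm.foldl (pvStepA ip) (acc, (i : Int))).1 = acc ++ (ip.drop i).take (sm.count 255) := by
  induction sm with
  | nil => intro acc i _; simp
  | cons o t ih =>
    intro acc i h
    by_cases ho : o = 255
    · subst ho
      have hc : (255 :: t).count (255:Int) = t.count 255 + 1 := by simp [List.count_cons]
      rw [hc] at h
      have hi : i < ip.length := by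
        have hd : (ip.drop i).length = ip.length - i := List.length_drop
        omega
      have hget : PySem.List.pyGet? ip (i : Int) = some ip[i] := by
        simp [PySem.List.pyGet?_natCast, List.getElem?_eq_getElem hi]
      have hdrop : ip.drop i = ip[i] :: ip.drop (i + 1) := by
        rw [List.drop_eq_getElem_cons hi]
      have hstep : pvStepA ip (acc, (i : Int)) 255 = (acc ++ [ip[i]], (i : Int) + 1) := by
        simp [pvStepA, hget]
      have hcast : ((i : Int) + 1) = ((i + 1 : Nat) : Int) := by push_cast; ring
      rw [List.foldl_cons, hstep, hcast, ih (acc ++ [ip[i]]) (i + 1) (by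
        have hd1 : (ip.drop (i+1)).length = ip.length - (i+1) := List.length_drop
        have hd2 : (ip.drop i).length = ip.length - i := List.length_drop
        omega)]
      rw [hc, hdrop, List.take_succ_cons]
      simp
    · have hc : (o :: t).count (255:Int) = t.count 255 := by simp [List.count_cons, ho]
      rw [List.foldl_cons]
      have hstep : pvStepA ip (acc, (i : Int)) o = (acc, (i : Int)) := by
        simp [pvStepA, ho]
      rw [hstep, ih acc i (hc ▸ h), hc]

-- the boundary loop closed form for positive address_size
theorem pvWhileA_eq (v a : Int) (ha : 1 ≤ a) : ∀ (fuel : Nat) (bs : Int),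
    v - bs < (fuel : Int) * a + a →
    pvWhileA v a fuel bs (bs + a - 1) =
      if v > bs then bs + PySem.Int.floordiv (v - bs) a * a else bs := by
  intro fuel
  induction fuel with
  | zero =>
    intro bs h
    simp only [pvWhileA]
    split_ifs with hv
    · have h1 : 0 < v - bs := by omega
      have h2 : v - bs < a := by simpa using h
      have : PySem.Int.floordiv (v - bs) a = 0 := by
        rw [PySem.Int.floordiv_eq_iff_of_pos (by omega)]
        constructor <;> omega
      rw [this]; ring
    · rfl
  | succ n ih =>
    intro bs h
    simp only [pvWhileA]
    by_cases hc : v > bs ∧ v > bs + a - 1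
    · rw [if_pos hc]
      have hbe : bs + a + a - 1 = (bs + a) + a - 1 := by ring
      have hrec := ih (bs + a) (by push_cast at h ⊢; nlinarith)
      rw [show bs + a - 1 + a = (bs + a) + a - 1 by ring, hrec]
      have hge : v ≥ bs + a := by omega
      by_cases hv2 : v > bs + a
      · rw [if_pos hv2, if_pos (by omega)]
        have : PySem.Int.floordiv (v - bs) a = PySem.Int.floordiv (v - (bs + a)) a + 1 := by
          have h0 : a ≠ 0 := by omega
          have : v - bs = (v - (bs + a)) + 1 * a := by ring
          rw [this, PySem.Int.floordiv]
          rw [Int.add_mul_fdiv_right _ _ h0]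
          rfl
        rw [this]; ring
      · have hv3 : v = bs + a := by omega
        rw [if_neg hv2, if_pos (by omega), hv3]
        have : PySem.Int.floordiv (bs + a - bs) a = 1 := by
          rw [PySem.Int.floordiv_eq_iff_of_pos (by omega)]
          constructor <;> nlinarith
        rw [this]; ring
    · rw [if_neg hc]
      push_neg at hc
      split_ifs with hv
      · have h1 : 0 < v - bs := by omega
        have h2 : v - bs < a := by omega
        have : PySem.Int.floordiv (v - bs) a = 0 := by
          rw [PySem.Int.floordiv_eq_iff_of_pos (by omega)]
          constructor <;> omega
        rw [this]; ring
      · rfl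

-- padding: with fuel 4 the pad loop is list arithmetic
theorem pvPadA_eq : ∀ (fuel : Nat) (l : List Int), 4 ≤ l.length + fuel →
    pvPadA fuel l = l ++ List.replicate ((4 : Int) - l.length).toNat 0 := by
  intro fuel
  induction fuel with
  | zero =>
    intro l h
    have : ((4 : Int) - l.length).toNat = 0 := by omega
    simp [pvPadA, this]
  | succ n ih =>
    intro l h
    simp only [pvPadA]
    split_ifs with hl
    · rw [ih (l ++ [0]) (by simp; omega)]
      have h1 : ((4 : Int) - l.length).toNat = (((4 : Int) - (l ++ [0]).length).toNat) + 1 := by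
        simp; omega
      rw [h1, List.replicate_succ, List.append_assoc]
      rfl
    · have : ((4 : Int) - l.length).toNat = 0 := by omega
      simp [this]

-- ===== VERDICT (by name: the statement is the Claim_ definition above) =====
theorem get_subnet_id_spec : Claim_equal_get_subnet_id := by
  intro sm ip a io _ hpre
  obtain ⟨hcnt, hir, hget⟩ := hpre
  unfold Spec_get_subnet_id get_subnet_id get_subnet_id_alt
  cases hg : PySem.List.pyGet? ip io with
  | none =>
    exact absurd hir (by rw [← PySem.List.pyGet?_eq_none_iff] at *; simp [hg])
  | some v =>
    rw [hg, Option.getD_some] at hget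
    simp only [Option.getD_some]
    -- prefix
    have hfold : (sm.foldl (pvStepA ip) ([], 0)).1 = ip.take (sm.count 255) := by
      have := pvFoldA_eq ip sm [] 0 (by simpa using hcnt)
      simpa using this
    have hslice : PySem.List.slice ip none (some (sm.count 255 : Int)) = ip.take (sm.count 255) := by
      have : ((sm.count 255 : Nat) : Int) = (sm.count 255 : Int) := by push_cast; rfl
      rw [← this, PySem.List.slice_to_natCast]
    -- boundary
    have hbs : pvWhileA v a (v.toNat + 1) 0 (a - 1) =
        if v > 0 then PySem.Int.floordiv v a * a else 0 := by
      by_cases hv : v > 0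
      · have ha : 1 ≤ a := by omega
        have := pvWhileA_eq v a ha (v.toNat + 1) 0 (by
          push_cast
          have h1 : (v.toNat : Int) = v := by omega
          nlinarith)
        simp only [show (0:Int) + a - 1 = a - 1 by ring, sub_zero] at this
        rw [this]; simp [hv]
      · have hv' : ¬ (v > 0 ∧ v > a - 1) := by omega
        have hvt : v.toNat + 1 = 0 + 1 := by omega
        rw [hvt]
        simp only [pvWhileA]
        rw [if_neg hv', if_neg hv]
    -- pad
    rw [hfold, hslice, hbs]
    set l := ip.take (sm.count 255) ++ [if v > 0 then PySem.Int.floordiv v a * a else 0] with hl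
    have hlen : 1 ≤ l.length := by simp [hl]
    rw [pvPadA_eq 4 l (by omega)]
    congr 1
    congr 1
    omega
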